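-- pv_equiv track=rewrite | github.com/hhee4455/CodingTest | 프로그래머스/2/142085. 디펜스 게임/디펜스 게임.py | solution
-- ===== SOURCE A (Python) =====
-- import heapq
--
-- def solution(n, k, enemy):
--     max_heap = []
--
--     for i in range(len(enemy)):
--         heapq.heappush(max_heap, -enemy[i])
--         n -= enemy[i]
--
--         if n < 0:
--             if k > 0:
--                 n += -heapq.heappop(max_heap)
--                 k -= 1
--             else:
--                 return i
--
--     return len(enemy)
-- ===== SOURCE B (Python) =====
-- def solution(n, k, enemy):
--     m = len(enemy)
--     # prefix sums: pre[j] = total damage of the first j waves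
--     pre = [0]
--     t = 0
--     for e in enemy:
--         t += e
--         pre.append(t)
--     removed = []      # enemies refunded by the skill so far (a multiset)
--     refunded = 0      # their total
--     i = 0
--     while True:
--         # skip ahead to the first wave where the remaining health would go negative
--         while i < m and pre[i + 1] - refunded <= n:
--             i += 1
--         if i == m:
--             return m
--         if k <= 0:
--             return i
--         # use the skill on the strongest enemy seen so far and not yet refunded
--         pool = list(enemy[: i + 1])
--         for r in removed:
--             pool.remove(r)
--         big = max(pool)
--         removed.append(big)
--         refunded += big
--         k -= 1
--         i += 1
-- ===== Notes on version B (the rewrite author's own statement) =====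
-- stated objective: alternative
-- what changed: B replaces A's online loop that mutates health and keeps a lazily-popped max-heap by a precomputed prefix-sum table, an inner skip-ahead scan to the next wave whose cumulative damage net of refunds exceeds n, and an outer loop over skill uses that rebuilds the surviving pool from an explicit refunded-enemy list to pick the maximum.
import Mathlib
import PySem

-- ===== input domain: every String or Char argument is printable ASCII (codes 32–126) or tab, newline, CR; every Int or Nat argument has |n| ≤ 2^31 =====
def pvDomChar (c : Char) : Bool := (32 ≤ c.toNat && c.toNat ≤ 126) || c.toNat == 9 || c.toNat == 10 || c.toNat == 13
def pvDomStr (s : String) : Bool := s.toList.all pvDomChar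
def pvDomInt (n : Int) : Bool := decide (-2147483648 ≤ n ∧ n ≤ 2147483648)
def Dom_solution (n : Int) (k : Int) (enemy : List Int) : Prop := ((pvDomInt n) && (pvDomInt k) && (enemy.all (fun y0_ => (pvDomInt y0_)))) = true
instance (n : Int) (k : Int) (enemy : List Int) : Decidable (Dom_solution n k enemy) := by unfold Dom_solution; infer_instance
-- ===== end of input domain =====

-- B replaces A's wave-by-wave heap loop by a precomputed prefix-sum table, a skip-ahead
-- scan to the next failing wave and an explicit list of refunded enemies (objective: alternative).

-- ===== PORT A =====
-- A's loop over range(len(enemy)): recursion over the remaining waves, carrying the wave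
-- index i, the heap (modelled by its multiset of elements: heappush = cons, heappop =
-- remove the minimum value — only the popped value and the surviving multiset are observable),
-- the remaining health n and the remaining skill count k.
def solutionGo : List Int → Nat → List Int → Int → Int → Int
  | [], i, _, _, _ => (i : Int)     -- loop finished: here i = len(enemy), the returned value
  | e :: rest, i, maxHeap, n, k =>
    let maxHeap' := (-e) :: maxHeap                                  -- heapq.heappush(max_heap, -enemy[i])
    let n' := n - e                                                  -- n -= enemy[i]
    if n' < 0 then
      if k > 0 then
        let popped := (PySem.List.min? maxHeap' (fun x => x)).getD 0 -- heapq.heappop(max_heap) (heap nonempty)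
        solutionGo rest (i+1) (maxHeap'.erase popped) (n' + (-popped)) (k-1)
      else (i : Int)                                                 -- return i
    else solutionGo rest (i+1) maxHeap' n' k

def solution (n : Int) (k : Int) (enemy : List Int) : Int :=
  solutionGo enemy 0 [] n k

-- ===== PORT B =====
-- pre = [0]; t = 0; for e in enemy: t += e; pre.append(t)
def preOf (enemy : List Int) : List Int × Int :=
  enemy.foldl (fun pt e => (pt.1 ++ [pt.2 + e], pt.2 + e)) ([0], 0)

-- the inner while: advance i to the first wave whose cumulative damage net of refunds
-- exceeds n, or to m
def bInner (n : Int) (pre : List Int) (m : Nat) (refunded : Int) (i : Nat) : Nat :=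
  if i < m then
    if pre.getD (i+1) 0 - refunded ≤ n then bInner n pre m refunded (i+1) else i
  else i
termination_by m - i

-- the outer while needs: bInner never moves i backwards (cited in decreasing_by)
theorem bInner_ge (n : Int) (pre : List Int) (m : Nat) (refunded : Int) (i : Nat) :
    i ≤ bInner n pre m refunded i := by
  fun_induction bInner with
  | case1 => omega
  | case2 => omega
  | case3 => omega

-- the outer while True loop
def bOuter (n : Int) (enemy pre : List Int) (m : Nat)
    (removed : List Int) (refunded k : Int) (i : Nat) : Int :=
  let j := bInner n pre m refunded i
  -- 'if i == m: return m' — the scan never passes m when started at i ≤ m, so '==' is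
  -- written '≤' only to make termination of the unreachable i > m states evident
  if hj : m ≤ j then (m : Int)
  else if k ≤ 0 then (j : Int)                                        -- if k <= 0: return i
  else
    -- pool = list(enemy[:i+1]); for r in removed: pool.remove(r)  (r is always present)
    let pool := removed.foldl (fun p r => p.erase r) (enemy.take (j+1))
    let big := (PySem.List.max? pool (fun x => x)).getD 0             -- max(pool) (pool nonempty)
    bOuter n enemy pre m (removed ++ [big]) (refunded + big) (k-1) (j+1)
termination_by m - i
decreasing_by
  have h1 := bInner_ge n pre m refunded i
  omega

def solution_alt (n : Int) (k : Int) (enemy : List Int) : Int :=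
  bOuter n enemy (preOf enemy).1 enemy.length [] 0 k 0

-- ===== PRECONDITION & SPEC =====
def Spec_solution (n : Int) (k : Int) (enemy : List Int) (out : Int) : Prop := out = solution_alt n k enemy
instance (n : Int) (k : Int) (enemy : List Int) (out : Int) : Decidable (Spec_solution n k enemy out) := by unfold Spec_solution; infer_instance

-- ===== CLAIM (what is proved, stated in full; the proofs are below) =====
def Claim_equal_solution : Prop := ∀ (n : Int) (k : Int) (enemy : List Int), Dom_solution n k enemy → Spec_solution n k enemy (solution n k enemy)

-- ===== LEMMAS AND PROOFS =====

-- pre is the prefix-sum table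
theorem preOf_fold (l : List Int) : ∀ (p : List Int) (t : Int),
    l.foldl (fun pt e => (pt.1 ++ [pt.2 + e], pt.2 + e)) (p, t)
      = (p ++ (List.range l.length).map (fun j => t + (l.take (j+1)).sum), t + l.sum) := by
  induction l with
  | nil => intro p t; simp
  | cons e l ih =>
    intro p t
    simp only [List.foldl_cons, ih, List.length_cons, List.range_succ_eq_map]
    simp [List.map_map, Function.comp_def, List.append_assoc]
    exact ⟨fun a _ => by ring, by ring⟩

theorem preOf_spec (l : List Int) :
    (preOf l).1 = (List.range (l.length + 1)).map (fun j => (l.take j).sum) := by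
  unfold preOf
  rw [preOf_fold]
  simp [List.range_succ_eq_map, List.map_map, Function.comp_def]

theorem pre_getD (l : List Int) (j : Nat) (h : j < l.length + 1) :
    (preOf l).1.getD j 0 = (l.take j).sum := by
  rw [preOf_spec]
  exact PySem.List.getD_map_range _ _ _ _ h

-- the pool built by successive list.remove is the multiset difference
theorem foldl_erase_coe : ∀ (rs l : List Int), (rs : Multiset Int) ≤ (l : Multiset Int) →
    ((rs.foldl (fun p r => p.erase r) l : List Int) : Multiset Int) = (l : Multiset Int) - (rs : Multiset Int) := by
  intro rs
  induction rs with
  | nil => intro l _; simp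
  | cons r rs ih =>
    intro l hle
    rw [← Multiset.cons_coe] at hle
    have h2 : (rs : Multiset Int) ≤ ((l.erase r : List Int) : Multiset Int) := by
      rw [← Multiset.coe_erase, ← Multiset.erase_cons_head r (rs : Multiset Int)]
      exact Multiset.erase_le_erase r hle
    simp only [List.foldl_cons]
    rw [ih _ h2, ← Multiset.cons_coe, Multiset.sub_cons, Multiset.coe_erase]

-- Python's min() over a rearrangement: the minimal int value is the same
theorem min?_perm_eq {l l' : List Int} (h : ∀ x, x ∈ l ↔ x ∈ l') :
    PySem.List.min? l (fun x => x) = PySem.List.min? l' (fun x => x) := by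
  cases hm : PySem.List.min? l (fun x => x) with
  | none =>
    rw [PySem.List.min?_eq_none_iff] at hm
    subst hm
    cases hm' : PySem.List.min? l' (fun x => x) with
    | none => rfl
    | some b =>
      have := PySem.List.min?_mem hm'
      rw [← h] at this
      simp at this
  | some a =>
    have ha := PySem.List.min?_mem hm
    have hamin := PySem.List.min?_isMin hm
    cases hm' : PySem.List.min? l' (fun x => x) with
    | none =>
      rw [PySem.List.min?_eq_none_iff] at hm'
      subst hm'
      simp [h] at ha
    | some b =>
      have hb := PySem.List.min?_mem hm'
      have hbmin := PySem.List.min?_isMin hm'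
      have h1 : a ≤ b := hamin b ((h b).mpr hb)
      have h2 : b ≤ a := hbmin a ((h a).mp ha)
      exact congrArg some (by omega)

-- min over the negated elements is the negated max
theorem min?_map_neg (p : List Int) :
    PySem.List.min? (p.map (fun x => -x)) (fun x => x)
      = (PySem.List.max? p (fun x => x)).map (fun x => -x) := by
  cases hM : PySem.List.max? p (fun x => x) with
  | none =>
    rw [PySem.List.max?_eq_none_iff] at hM
    subst hM
    simp [PySem.List.min?]
  | some b =>
    have hb := PySem.List.max?_mem hM
    have hbmax := PySem.List.max?_isMax hM
    cases hm : PySem.List.min? (p.map (fun x => -x)) (fun x => x) with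
    | none =>
      rw [PySem.List.min?_eq_none_iff, List.map_eq_nil_iff] at hm
      subst hm; simp at hb
    | some v =>
      have hv := PySem.List.min?_mem hm
      have hvmin := PySem.List.min?_isMin hm
      simp only [List.mem_map] at hv
      obtain ⟨c, hc, hcv⟩ := hv
      have h1 : v ≤ -b := hvmin (-b) (List.mem_map_of_mem hb)
      have h2 : -b ≤ v := by
        have := hbmax c hc
        omega
      simp only [Option.map_some]
      exact congrArg some (by omega)

theorem sub_le_of_mem_sub {s t : Multiset Int} {b : Int} (hts : t ≤ s) (hb : b ∈ s - t) :
    t + {b} ≤ s := by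
  rw [Multiset.le_iff_count]
  intro x
  have h1 := Multiset.le_iff_count.mp hts x
  have h2 := Multiset.count_pos.mpr hb
  rw [Multiset.count_sub] at h2
  rw [Multiset.count_add]
  by_cases hx : x = b
  · subst hx; simp; omega
  · simp [hx]; omega

-- bOuter only looks through bInner: stepping the inner scan past a survivable wave
-- does not change the result
theorem bOuter_inner_step (n : Int) (enemy pre : List Int) (m : Nat)
    (removed : List Int) (refunded k : Int) (i : Nat)
    (h : bInner n pre m refunded i = bInner n pre m refunded (i+1)) :
    bOuter n enemy pre m removed refunded k i = bOuter n enemy pre m removed refunded k (i+1) := by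
  conv_lhs => rw [bOuter.eq_def]
  conv_rhs => rw [bOuter.eq_def]
  rw [h]

-- the main simulation invariant: A's state at wave i against B's (removed, refunded)
theorem main_sim (n0 : Int) (enemy : List Int) :
    ∀ (rest : List Int) (i : Nat) (maxHeap removed : List Int) (n k refunded : Int),
    rest = enemy.drop i →
    i ≤ enemy.length →
    (maxHeap : Multiset Int)
      = (((enemy.take i : List Int) : Multiset Int) - (removed : Multiset Int)).map (fun x => -x) →
    (removed : Multiset Int) ≤ ((enemy.take i : List Int) : Multiset Int) →
    refunded = removed.sum →
    n = n0 - (enemy.take i).sum + refunded →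
    solutionGo rest i maxHeap n k
      = bOuter n0 enemy (preOf enemy).1 enemy.length removed refunded k i := by
  intro rest
  induction rest with
  | nil =>
    intro i maxHeap removed n k refunded hrest hile _ _ _ _
    have him : i = enemy.length := by
      have := List.drop_eq_nil_iff.mp hrest.symm
      omega
    rw [bOuter.eq_def]
    rw [bInner]
    simp only [him, lt_irrefl, if_false]
    rw [dif_pos (le_refl _)]
    simp [solutionGo]
  | cons e rest' ih =>
    intro i maxHeap removed n k refunded hrest hile hheap hrem href hn
    have hi : i < enemy.length := by
      have := congrArg List.length hrest
      simp [List.length_drop] at this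
      omega
    have he : enemy[i]? = some e := by
      rw [← List.head?_drop, ← hrest]; rfl
    have htake : enemy.take (i+1) = enemy.take i ++ [e] := by
      rw [List.take_add_one, he]; rfl
    have hrest' : rest' = enemy.drop (i+1) := by
      rw [List.drop_add_one_eq_tail_drop, ← hrest]
      rfl
    have hS1 : (enemy.take (i+1)).sum = (enemy.take i).sum + e := by
      rw [htake]; simp
    have hpre : (preOf enemy).1.getD (i+1) 0 = (enemy.take (i+1)).sum :=
      pre_getD enemy (i+1) (by omega)
    -- invariants pushed one wave forward (the heappush happens in every branch)
    have hrem1 : (removed : Multiset Int) ≤ ((enemy.take (i+1) : List Int) : Multiset Int) := by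
      rw [htake, ← Multiset.coe_add]
      exact le_trans hrem (Multiset.le_add_right _ _)
    have hcoe1 : ((enemy.take (i+1) : List Int) : Multiset Int)
        = ((enemy.take i : List Int) : Multiset Int) + {e} := by
      rw [htake, ← Multiset.coe_add]; rfl
    have hheap1 : (((-e) :: maxHeap : List Int) : Multiset Int)
        = (((enemy.take (i+1) : List Int) : Multiset Int) - (removed : Multiset Int)).map (fun x => -x) := by
      rw [hcoe1, (tsub_add_eq_add_tsub hrem).symm, Multiset.map_add, ← hheap]
      rw [← Multiset.cons_coe]
      have : Multiset.map (fun x => -x) ({e} : Multiset Int) = {-e} := rfl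
      rw [this, add_comm, Multiset.singleton_add]
    by_cases hcond : n - e < 0
    · have hbi : bInner n0 (preOf enemy).1 enemy.length refunded i = i := by
        have hc : ¬ ((preOf enemy).1.getD (i+1) 0 - refunded ≤ n0) := by
          rw [hpre]; omega
        rw [bInner, if_pos hi, if_neg hc]
      by_cases hk : k > 0
      · -- skill used: A pops the heap maximum, B refunds max(pool)
        rw [bOuter.eq_def, hbi]
        rw [dif_neg (by omega : ¬ enemy.length ≤ i)]
        rw [if_neg (by omega : ¬ k ≤ 0)]
        simp only []
        set pool := removed.foldl (fun p r => p.erase r) (enemy.take (i+1)) with hpooldef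
        have hpool : ((pool : List Int) : Multiset Int)
            = ((enemy.take (i+1) : List Int) : Multiset Int) - (removed : Multiset Int) :=
          foldl_erase_coe removed _ hrem1
        have hkey : (((-e) :: maxHeap : List Int) : Multiset Int)
            = ((pool.map (fun x => -x) : List Int) : Multiset Int) := by
          rw [hheap1, ← hpool, ← Multiset.map_coe]
        have hperm := Multiset.coe_eq_coe.mp hkey
        have hmem : ∀ x, x ∈ ((-e) :: maxHeap) ↔ x ∈ pool.map (fun x => -x) :=
          fun x => hperm.mem_iff
        obtain ⟨big, hbig⟩ : ∃ b, PySem.List.max? pool (fun x => x) = some b := by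
          cases hmx : PySem.List.max? pool (fun x => x) with
          | none =>
            exfalso
            have h0 := (PySem.List.max?_eq_none_iff _ _).mp hmx
            rw [h0] at hperm
            simp at hperm
          | some b => exact ⟨b, rfl⟩
        have hmin : PySem.List.min? ((-e) :: maxHeap) (fun x => x) = some (-big) := by
          rw [min?_perm_eq hmem, min?_map_neg, hbig]; rfl
        have hbigmem : big ∈ ((enemy.take (i+1) : List Int) : Multiset Int) - (removed : Multiset Int) := by
          rw [← hpool]
          exact Multiset.mem_coe.mpr (PySem.List.max?_mem hbig)
        have hremcoe : ((removed ++ [big] : List Int) : Multiset Int)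
            = (removed : Multiset Int) + {big} := by
          rw [← Multiset.coe_add]; rfl
        simp only [solutionGo, if_pos hcond, if_pos hk, hmin, Option.getD_some, hbig]
        refine ih (i+1) _ (removed ++ [big]) _ (k-1) (refunded + big) hrest' (by omega) ?_ ?_ ?_ ?_
        · -- heap after the pop
          rw [← Multiset.coe_erase, hheap1]
          have hmaperase := Multiset.map_erase (fun x : Int => -x) (fun x y h => neg_inj.mp h) big
            (((enemy.take (i+1) : List Int) : Multiset Int) - (removed : Multiset Int))
          rw [← hmaperase]
          congr 1
          rw [← Multiset.sub_singleton, ← Multiset.sub_add_eq_sub_sub, hremcoe]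
        · rw [hremcoe]
          exact sub_le_of_mem_sub hrem1 hbigmem
        · rw [List.sum_append, href]; simp
        · rw [hS1]; omega
      · -- skills exhausted: both return i
        rw [bOuter.eq_def, hbi]
        rw [dif_neg (by omega : ¬ enemy.length ≤ i)]
        rw [if_pos (by omega : k ≤ 0)]
        simp [solutionGo, hcond, hk]
    · -- wave survived without the skill: step both sides
      have hbi : bInner n0 (preOf enemy).1 enemy.length refunded i
          = bInner n0 (preOf enemy).1 enemy.length refunded (i+1) := by
        have hc : (preOf enemy).1.getD (i+1) 0 - refunded ≤ n0 := by
          rw [hpre]; omega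
        conv_lhs => rw [bInner]
        rw [if_pos hi, if_pos hc]
      rw [bOuter_inner_step _ _ _ _ _ _ _ _ hbi]
      simp only [solutionGo, if_neg hcond]
      exact ih (i+1) _ removed _ k refunded hrest' (by omega) hheap1 hrem1 href (by rw [hS1]; omega)

-- ===== VERDICT (by name: the statement is the Claim_ definition above) =====
theorem solution_spec : Claim_equal_solution := by
  intro n k enemy _
  unfold Spec_solution solution solution_alt
  exact main_sim n enemy enemy 0 [] [] n k 0 rfl (by omega) (by simp) (by simp) rfl (by simp)
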